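-- pv_equiv track=rewrite | github.com/natesmalley/coral_collective | memory/vector_store.py | _extract_original_content
-- ===== SOURCE A (Python) =====
-- def _extract_original_content(enhanced_content: str) -> str:
--     """Extract original content from enhanced content used for embedding"""
--     # Split by newlines and take everything before metadata additions
--     lines = enhanced_content.split('\n')
--
--     # Find where we added metadata (lines starting with known prefixes)
--     content_lines = []
--     for line in lines:
--         if line.startswith(('Tags:', 'Agent:', 'Type:', 'Context:')):
--             break
--         content_lines.append(line)
--
--     return '\n'.join(content_lines).strip()
-- ===== SOURCE B (Python) =====
-- import re
--
-- _META_RE = re.compile(r'^(?:Tags:|Agent:|Type:|Context:)', re.MULTILINE)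
--
--
-- def _extract_original_content(enhanced_content: str) -> str:
--     """Extract original content from enhanced content used for embedding"""
--     # Locate the first metadata line directly on the whole string and slice.
--     m = _META_RE.search(enhanced_content)
--     if m:
--         return enhanced_content[:m.start()].strip()
--     return enhanced_content.strip()
-- ===== Notes on version B (the rewrite author's own statement) =====
-- stated objective: idiomatic
-- what changed: Instead of splitting into a list of lines and accumulating them until a metadata prefix line, B compiles one multiline regex, locates the first metadata line-start directly on the whole string, and slices the string there before stripping.
import Mathlib
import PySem

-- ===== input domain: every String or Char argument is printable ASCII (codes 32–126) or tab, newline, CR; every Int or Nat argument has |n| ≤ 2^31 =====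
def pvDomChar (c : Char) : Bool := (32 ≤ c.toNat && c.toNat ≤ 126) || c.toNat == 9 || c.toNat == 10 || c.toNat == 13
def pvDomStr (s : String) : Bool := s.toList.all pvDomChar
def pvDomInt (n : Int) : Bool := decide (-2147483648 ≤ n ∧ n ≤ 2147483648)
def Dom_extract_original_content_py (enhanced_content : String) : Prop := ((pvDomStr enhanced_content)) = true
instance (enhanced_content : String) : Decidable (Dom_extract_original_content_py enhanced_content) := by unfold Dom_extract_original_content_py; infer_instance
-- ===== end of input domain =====

-- B locates the first metadata line-start with one multiline-regex search and slices there,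
-- instead of A's split-into-lines / accumulate / rejoin; same result, idiomatic rather than faster.


-- ===== PORT A =====
-- the four metadata prefixes of the Python tuple, shared by both ports
def pvPrefixes : List (List Char) := ["Tags:".toList, "Agent:".toList, "Type:".toList, "Context:".toList]

-- line.startswith(('Tags:', 'Agent:', 'Type:', 'Context:'))
def pvStartsMeta (l : List Char) : Bool := pvPrefixes.any (fun p => PySem.Chars.startswith l p)

-- A's for-loop with break: keep lines until one starts with a metadata prefix
def pvALoop : List (List Char) → List (List Char)
  | [] => []
  | l :: rest => if pvStartsMeta l then [] else l :: pvALoop rest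

def extract_original_content_py (enhanced_content : String) : String :=
  let lines := PySem.Chars.splitOn enhanced_content.toList ['\n']
  String.ofList (PySem.Chars.strip (PySem.Chars.join ['\n'] (pvALoop lines)))

-- ===== PORT B =====
-- the regex search for r'^(?:Tags:|Agent:|Type:|Context:)' with re.MULTILINE: leftmost position
-- that is a line start (string start, or preceded by '\n') where a prefix matches; returns m.start()
def pvFindBoundary : List Char → Nat → Bool → Option Nat
  | [], _, _ => none
  | c :: rest, i, atStart =>
    if atStart && pvStartsMeta (c :: rest) then some i
    else pvFindBoundary rest (i + 1) (c == '\n')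

def extract_original_content_py_alt (enhanced_content : String) : String :=
  match pvFindBoundary enhanced_content.toList 0 true with
  | some i => String.ofList (PySem.Chars.strip (enhanced_content.toList.take i))  -- enhanced_content[:m.start()].strip(); m.start() ≥ 0 so the slice is take
  | none => String.ofList (PySem.Chars.strip enhanced_content.toList)

-- ===== PRECONDITION & SPEC =====
def Spec_extract_original_content_py (enhanced_content : String) (out : String) : Prop := out = extract_original_content_py_alt enhanced_content
instance (enhanced_content : String) (out : String) : Decidable (Spec_extract_original_content_py enhanced_content out) := by unfold Spec_extract_original_content_py; infer_instance

-- ===== CLAIM (what is proved, stated in full; the proofs are below) =====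
def Claim_equal_extract_original_content_py : Prop := ∀ (enhanced_content : String), Dom_extract_original_content_py enhanced_content → Spec_extract_original_content_py enhanced_content (extract_original_content_py enhanced_content)

-- ===== LEMMAS AND PROOFS =====

-- proof-only reference splitter: Python s.split('\n')
def pvSplit : List Char → List (List Char)
  | [] => [[]]
  | c :: rest =>
    if c = '\n' then [] :: pvSplit rest
    else match pvSplit rest with
      | x :: xs => (c :: x) :: xs
      | [] => [[c]]

lemma pvSplit_ne_nil (cs : List Char) : pvSplit cs ≠ [] := by
  cases cs with
  | nil => simp [pvSplit]
  | cons c rest => simp only [pvSplit]; split_ifs; · simp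
                   · cases pvSplit rest <;> simp

-- prepend a prefix onto the first piece
def pvPrepend (pre : List Char) : List (List Char) → List (List Char)
  | [] => [pre]
  | x :: xs => (pre ++ x) :: xs

lemma pvPrepend_nil (ls : List (List Char)) (h : ls ≠ []) : pvPrepend [] ls = ls := by
  cases ls with
  | nil => exact absurd rfl h
  | cons x xs => simp [pvPrepend]

lemma splitOn_go_spec : ∀ (fuel : Nat) (l cur : List Char) (acc : List (List Char)),
    l.length ≤ fuel →
    PySem.Chars.splitOn.go ['\n'] fuel l cur acc = acc.reverse ++ pvPrepend cur.reverse (pvSplit l) := by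
  intro fuel
  induction fuel with
  | zero =>
    intro l cur acc h
    have : l = [] := List.length_eq_zero_iff.mp (Nat.le_zero.mp h)
    subst this
    simp [PySem.Chars.splitOn.go, pvSplit, pvPrepend]
  | succ fuel ih =>
    intro l cur acc h
    cases l with
    | nil => simp [PySem.Chars.splitOn.go, pvSplit, pvPrepend]
    | cons c rest =>
      simp only [PySem.Chars.splitOn.go]
      by_cases hc : c = '\n'
      · subst hc
        have hpre : List.isPrefixOf ['\n'] ('\n' :: rest) = true := by
          simp [List.isPrefixOf]
        rw [if_pos hpre]
        have hr : rest.length ≤ fuel := by simpa using h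
        rw [show List.drop (['\n'] : List Char).length ('\n' :: rest) = rest from rfl]
        rw [ih rest [] ((cur.reverse) :: acc) hr, List.reverse_nil,
          pvPrepend_nil _ (pvSplit_ne_nil rest)]
        simp [pvSplit, pvPrepend]
      · have hpre : List.isPrefixOf ['\n'] (c :: rest) = false := by
          simp [List.isPrefixOf]
          exact fun hh => absurd hh.symm hc
        rw [if_neg (by simp [hpre])]
        have hr : rest.length ≤ fuel := by
          have := h; simp only [List.length_cons] at this; omega
        rw [ih rest (c :: cur) acc hr]
        simp only [pvSplit, if_neg hc]
        cases hsp : pvSplit rest with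
        | nil => exact absurd hsp (pvSplit_ne_nil rest)
        | cons x xs => simp [pvPrepend]

lemma splitOn_eq_pvSplit (cs : List Char) : PySem.Chars.splitOn cs ['\n'] = pvSplit cs := by
  unfold PySem.Chars.splitOn
  rw [splitOn_go_spec (cs.length + 1) cs [] [] (Nat.le_succ _)]
  simp [pvPrepend_nil _ (pvSplit_ne_nil cs)]

-- pvSplit on a first-line decomposition
lemma pvSplit_line (l rest : List Char) (hl : '\n' ∉ l) :
    pvSplit (l ++ '\n' :: rest) = l :: pvSplit rest := by
  induction l with
  | nil => simp [pvSplit]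
  | cons c l ih =>
    have hc : c ≠ '\n' := by intro h; exact hl (by simp [h])
    have hl' : '\n' ∉ l := fun h => hl (by simp [h])
    simp only [List.cons_append, pvSplit, if_neg hc, ih hl']

lemma pvSplit_no_newline (cs : List Char) (h : '\n' ∉ cs) : pvSplit cs = [cs] := by
  induction cs with
  | nil => rfl
  | cons c rest ih =>
    have hc : c ≠ '\n' := by intro hh; exact h (by simp [hh])
    have h' : '\n' ∉ rest := fun hh => h (by simp [hh])
    simp only [pvSplit, if_neg hc, ih h']

-- a prefix with no '\n' matches l ++ '\n' :: rest iff it matches the first line l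
lemma isPrefixOf_cut (p : List Char) : ∀ (l rest : List Char), '\n' ∉ p → '\n' ∉ l →
    List.isPrefixOf p (l ++ '\n' :: rest) = List.isPrefixOf p l := by
  induction p with
  | nil => intro l rest _ _; cases l <;> simp [List.isPrefixOf]
  | cons q p ih =>
    intro l rest hp hl
    cases l with
    | nil =>
      have hq : q ≠ '\n' := by intro h; exact hp (by simp [h])
      simp only [List.nil_append, List.isPrefixOf, Bool.and_eq_false_imp]
      rw [show (q == '\n') = false from by simp [hq]]
      simp
    | cons a l =>
      have hp' : '\n' ∉ p := fun h => hp (by simp [h])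
      have hl' : '\n' ∉ l := fun h => hl (by simp [h])
      simp only [List.cons_append, List.isPrefixOf, ih l rest hp' hl']

lemma pvStartsMeta_cut (l rest : List Char) (hl : '\n' ∉ l) :
    pvStartsMeta (l ++ '\n' :: rest) = pvStartsMeta l := by
  simp only [pvStartsMeta, pvPrefixes, List.any_cons, List.any_nil,
    PySem.Chars.startswith]
  rw [isPrefixOf_cut _ l rest (by decide) hl, isPrefixOf_cut _ l rest (by decide) hl,
    isPrefixOf_cut _ l rest (by decide) hl, isPrefixOf_cut _ l rest (by decide) hl]

lemma pvStartsMeta_newline (xs : List Char) : pvStartsMeta ('\n' :: xs) = false := by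
  simp [pvStartsMeta, pvPrefixes, PySem.Chars.startswith, List.isPrefixOf]

-- what B takes: the string up to the found boundary
def pvTakeB (cs : List Char) (a : Bool) : List Char :=
  match pvFindBoundary cs 0 a with
  | some i => cs.take i
  | none => cs

lemma pvFindBoundary_shift : ∀ (cs : List Char) (i : Nat) (a : Bool),
    pvFindBoundary cs (i + 1) a = (pvFindBoundary cs i a).map (· + 1) := by
  intro cs
  induction cs with
  | nil => intro i a; rfl
  | cons c rest ih =>
    intro i a
    simp only [pvFindBoundary]
    split_ifs with h
    · rfl
    · exact ih (i + 1) (c == '\n')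

lemma pvTakeB_cons (c : Char) (cs : List Char) (a : Bool) :
    pvTakeB (c :: cs) a = if a && pvStartsMeta (c :: cs) then [] else c :: pvTakeB cs (c == '\n') := by
  unfold pvTakeB
  simp only [pvFindBoundary]
  split_ifs with h
  · simp
  · rw [pvFindBoundary_shift cs 0 (c == '\n')]
    cases pvFindBoundary cs 0 (c == '\n') <;> simp

lemma pvTakeB_no_newline_false (cs : List Char) (h : '\n' ∉ cs) : pvTakeB cs false = cs := by
  induction cs with
  | nil => rfl
  | cons c rest ih =>
    have hc : c ≠ '\n' := by intro hh; exact h (by simp [hh])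
    have h' : '\n' ∉ rest := fun hh => h (by simp [hh])
    rw [pvTakeB_cons]
    simp only [Bool.false_and, if_neg (by simp : ¬ (false = true))]
    rw [show (c == '\n') = false from by simp [hc], ih h']

lemma pvTakeB_line_false (l rest : List Char) (hl : '\n' ∉ l) :
    pvTakeB (l ++ '\n' :: rest) false = l ++ '\n' :: pvTakeB rest true := by
  induction l with
  | nil =>
    simp only [List.nil_append]
    rw [pvTakeB_cons]
    simp
  | cons c l ih =>
    have hc : c ≠ '\n' := by intro hh; exact hl (by simp [hh])
    have hl' : '\n' ∉ l := fun hh => hl (by simp [hh])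
    rw [List.cons_append, pvTakeB_cons]
    simp only [Bool.false_and, if_neg (by simp : ¬ (false = true))]
    rw [show (c == '\n') = false from by simp [hc], ih hl']
    simp

lemma pvTakeB_line_true (l rest : List Char) (hl : '\n' ∉ l) :
    pvTakeB (l ++ '\n' :: rest) true = if pvStartsMeta l then [] else l ++ '\n' :: pvTakeB rest true := by
  cases l with
  | nil =>
    simp only [List.nil_append]
    rw [pvTakeB_cons]
    simp [pvStartsMeta_newline, show pvStartsMeta [] = false from by decide]
  | cons c l =>
    have hc : c ≠ '\n' := by intro hh; exact hl (by simp [hh])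
    have hl' : '\n' ∉ l := fun hh => hl (by simp [hh])
    rw [List.cons_append, pvTakeB_cons]
    have hcut : pvStartsMeta (c :: (l ++ '\n' :: rest)) = pvStartsMeta (c :: l) := by
      have := pvStartsMeta_cut (c :: l) rest hl
      simpa using this
    rw [hcut]
    simp only [Bool.true_and]
    split_ifs with h
    · rfl
    · rw [show (c == '\n') = false from by simp [hc], pvTakeB_line_false l rest hl']
      simp

lemma pvTakeB_no_newline_true (cs : List Char) (h : '\n' ∉ cs) :
    pvTakeB cs true = if pvStartsMeta cs then [] else cs := by
  cases cs with
  | nil => simp [pvTakeB, pvFindBoundary, show pvStartsMeta [] = false from by decide]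
  | cons c rest =>
    have hc : c ≠ '\n' := by intro hh; exact h (by simp [hh])
    have h' : '\n' ∉ rest := fun hh => h (by simp [hh])
    rw [pvTakeB_cons]
    simp only [Bool.true_and]
    split_ifs with hm
    · rfl
    · rw [show (c == '\n') = false from by simp [hc], pvTakeB_no_newline_false rest h']

lemma strip_append_newline (x : List Char) :
    PySem.Chars.strip (x ++ ['\n']) = PySem.Chars.strip x := by
  simp only [PySem.Chars.strip, PySem.Chars.lstrip, PySem.Chars.rstrip]
  rw [List.dropWhile_append]
  split_ifs with h
  · simp only [List.isEmpty_iff] at h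
    rw [h]
    simp [PySem.Chars.isspace]
  · simp [List.reverse_append, PySem.Chars.isspace]

-- the heart: how B's boundary cut relates to A's kept-lines join, by strong induction on length
lemma pvMain : ∀ (n : Nat) (cs : List Char), cs.length ≤ n →
    (pvALoop (pvSplit cs) = pvSplit cs ∧ pvTakeB cs true = PySem.Chars.join ['\n'] (pvALoop (pvSplit cs)))
    ∨ (pvALoop (pvSplit cs) ≠ [] ∧ pvTakeB cs true = PySem.Chars.join ['\n'] (pvALoop (pvSplit cs)) ++ ['\n'])
    ∨ (pvALoop (pvSplit cs) = [] ∧ pvTakeB cs true = []) := by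
  intro n
  induction n with
  | zero =>
    intro cs h
    have : cs = [] := List.length_eq_zero_iff.mp (Nat.le_zero.mp h)
    subst this
    left
    constructor
    · simp [pvSplit, pvALoop, show pvStartsMeta [] = false from by decide]
    · simp [pvSplit, pvALoop, pvTakeB, pvFindBoundary,
        show pvStartsMeta [] = false from by decide, PySem.Chars.join, List.intercalate]
  | succ n ih =>
    intro cs hlen
    by_cases hnl : '\n' ∈ cs
    · -- cs = l ++ '\n' :: rest with '\n' ∉ l
      obtain ⟨l, rest, rfl, hl⟩ :
          ∃ l rest, cs = l ++ '\n' :: rest ∧ '\n' ∉ l := by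
        induction cs with
        | nil => simp at hnl
        | cons c cs ihc =>
          by_cases hc : c = '\n'
          · exact ⟨[], cs, by simp [hc], by simp⟩
          · have : '\n' ∈ cs := by
              rcases List.mem_cons.mp hnl with h | h
              · exact absurd h.symm hc
              · exact h
            obtain ⟨l, rest, heq, hlf⟩ := ihc (by simpa using Nat.le_of_succ_le (by simpa using hlen)) this
            exact ⟨c :: l, rest, by simp [heq], by simp [hlf, Ne.symm hc]⟩
      rw [pvSplit_line l rest hl, pvTakeB_line_true l rest hl]
      by_cases hm : pvStartsMeta l
      · right; right
        simp [pvALoop, hm]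
      · have hrest : rest.length ≤ n := by
          have := hlen
          simp only [List.length_append, List.length_cons] at this
          omega
        simp only [pvALoop, if_neg hm]
        rcases ih rest hrest with ⟨hkeep, heq⟩ | ⟨hne, heq⟩ | ⟨hnil, heq⟩
        · left
          refine ⟨by rw [hkeep], ?_⟩
          rw [heq, hkeep]
          cases hsp : pvSplit rest with
          | nil => exact absurd hsp (pvSplit_ne_nil rest)
          | cons x xs =>
            rw [PySem.Chars.join_cons_cons]
            simp
        · right; left
          refine ⟨by simp, ?_⟩
          rw [heq]
          cases hk : pvALoop (pvSplit rest) with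
          | nil => exact absurd hk hne
          | cons x xs =>
            rw [PySem.Chars.join_cons_cons]
            simp
        · right; left
          refine ⟨by simp, ?_⟩
          rw [hnil, heq]
          simp [PySem.Chars.join, List.intercalate]
    · -- no newline: one single line
      rw [pvSplit_no_newline cs hnl, pvTakeB_no_newline_true cs hnl]
      by_cases hm : pvStartsMeta cs
      · right; right
        simp [pvALoop, hm]
      · left
        simp [pvALoop, hm, PySem.Chars.join_singleton]

lemma alt_eq_takeB (s : String) :
    extract_original_content_py_alt s = String.ofList (PySem.Chars.strip (pvTakeB s.toList true)) := by
  unfold extract_original_content_py_alt pvTakeB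
  cases pvFindBoundary s.toList 0 true <;> rfl

-- ===== VERDICT (by name: the statement is the Claim_ definition above) =====
theorem extract_original_content_py_spec : Claim_equal_extract_original_content_py := by
  unfold Claim_equal_extract_original_content_py
  intro s _
  unfold Spec_extract_original_content_py
  rw [alt_eq_takeB]
  have hA : extract_original_content_py s
      = String.ofList (PySem.Chars.strip (PySem.Chars.join ['\n'] (pvALoop (pvSplit s.toList)))) := by
    unfold extract_original_content_py
    rw [splitOn_eq_pvSplit]
  rw [hA]
  rcases pvMain s.toList.length s.toList le_rfl with ⟨_, heq⟩ | ⟨_, heq⟩ | ⟨hnil, heq⟩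
  · rw [heq]
  · rw [heq, strip_append_newline]
  · rw [hnil, heq, PySem.Chars.join_nil]
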